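-- pv_equiv track=rewrite | github.com/Air2air/z-beam-generator | backups/properties_to_materialproperties_1758780179/components/frontmatter/ordering/field_ordering_service.py | _create_clean_machine_settings_structure
-- ===== SOURCE A (Python) =====
-- from typing import Dict
--
-- def _create_clean_machine_settings_structure(machine_settings: Dict) -> Dict:
--     """Create clean machine settings structure with logical grouping"""
--     clean_settings = {}
--
--     # Machine setting groups in logical order
--     setting_groups = [
--         "powerRange", "wavelength", "pulseDuration", "spotSize",
--         "repetitionRate", "fluenceRange", "scanningSpeed"
--     ]
--
--     # Add each setting group cleanly
--     for setting in setting_groups: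
--         if setting in machine_settings:
--             clean_settings[setting] = machine_settings[setting]
--
--             # Add associated fields in order
--             for suffix in ["Unit", "Range"]:
--                 field_name = f"{setting}{suffix}"
--                 if field_name in machine_settings:
--                     clean_settings[field_name] = machine_settings[field_name]
--
--     # Add any remaining settings
--     for key, value in machine_settings.items():
--         if key not in clean_settings:
--             clean_settings[key] = value
--
--     return clean_settings
-- ===== SOURCE B (Python) =====
-- from typing import Dict
--
-- def _create_clean_machine_settings_structure(machine_settings: Dict) -> Dict:
--     """Create clean machine settings structure with logical grouping (sort by a precomputed priority table)."""
--     setting_groups = [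
--         "powerRange", "wavelength", "pulseDuration", "spotSize",
--         "repetitionRate", "fluenceRange", "scanningSpeed"
--     ]
--     # Flatten the present groups into the priority order of recognised field names.
--     order = []
--     for setting in setting_groups:
--         if setting in machine_settings:
--             order.extend((setting, setting + "Unit", setting + "Range"))
--     rank = {name: i for i, name in enumerate(order)}
--     # Every remaining key gets its own (larger) rank in original insertion order.
--     for key in machine_settings:
--         if key not in rank:
--             rank[key] = len(rank)
--     return dict(sorted(machine_settings.items(), key=lambda kv: rank[kv[0]]))
-- ===== Notes on version B (the rewrite author's own statement) =====
-- stated objective: idiomatic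
-- what changed: Instead of A's two insertion passes over a fresh dict, B flattens the present setting groups into one priority list, builds a rank table (leftover keys get increasing ranks in insertion order), and produces the result with a single stable sorted() over all items keyed by rank.
import Mathlib
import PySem

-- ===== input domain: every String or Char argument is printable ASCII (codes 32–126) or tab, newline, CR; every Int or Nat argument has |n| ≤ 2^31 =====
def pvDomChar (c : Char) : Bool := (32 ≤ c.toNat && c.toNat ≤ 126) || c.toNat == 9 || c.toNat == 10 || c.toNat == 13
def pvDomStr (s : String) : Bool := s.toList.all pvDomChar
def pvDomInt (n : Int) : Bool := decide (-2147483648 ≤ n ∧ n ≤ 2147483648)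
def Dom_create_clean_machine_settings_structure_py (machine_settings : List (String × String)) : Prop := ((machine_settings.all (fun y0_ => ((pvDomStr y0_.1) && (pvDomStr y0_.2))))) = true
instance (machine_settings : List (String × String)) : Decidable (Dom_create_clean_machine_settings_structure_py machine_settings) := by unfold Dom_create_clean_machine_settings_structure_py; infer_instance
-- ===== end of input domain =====

-- B reorders by ONE stable sort over a precomputed priority table instead of A's two insertion passes (objective: idiomatic, not faster).
-- ===== PORT A =====
def create_clean_machine_settings_structure_py (machine_settings : List (String × String)) : List (String × String) :=
  -- the dict parameter, as the insertion-ordered association list it is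
  let d : PySem.Dict String String := PySem.Dict.mk machine_settings
  let setting_groups : List String :=
    ["powerRange", "wavelength", "pulseDuration", "spotSize",
     "repetitionRate", "fluenceRange", "scanningSpeed"]
  let clean_settings : PySem.Dict String String :=
    setting_groups.foldl (fun cs setting =>
      if d.contains setting then
        let cs := cs.insert setting (d.getD setting "")
        (["Unit", "Range"] : List String).foldl (fun cs suffix =>
          let field_name := setting ++ suffix
          if d.contains field_name then cs.insert field_name (d.getD field_name "") else cs) cs
      else cs) PySem.Dict.empty
  let clean_settings :=
    d.items.foldl (fun cs kv => if cs.contains kv.1 then cs else cs.insert kv.1 kv.2) clean_settings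
  clean_settings.items

-- ===== PORT B =====
def create_clean_machine_settings_structure_py_alt (machine_settings : List (String × String)) : List (String × String) :=
  let d : PySem.Dict String String := PySem.Dict.mk machine_settings
  let setting_groups : List String :=
    ["powerRange", "wavelength", "pulseDuration", "spotSize",
     "repetitionRate", "fluenceRange", "scanningSpeed"]
  let order : List String :=
    setting_groups.foldl (fun o setting =>
      if d.contains setting then o ++ [setting, setting ++ "Unit", setting ++ "Range"] else o) []
  let rank : PySem.Dict String Int :=
    (PySem.List.enumerate order 0).foldl (fun r p => r.insert p.2 p.1) PySem.Dict.empty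
  let rank : PySem.Dict String Int :=
    d.items.foldl (fun r kv => if r.contains kv.1 then r else r.insert kv.1 (r.size : Int)) rank
  PySem.List.sorted d.items (fun kv => rank.getD kv.1 0) false

-- ===== PRECONDITION & SPEC =====
-- Pre_ excludes association lists with duplicate keys: they do not represent a single Python dict
-- (the Python function only ever receives each key once), so the two ports' treatment of a
-- repeated key is accidental and nothing is claimed there.
def Pre_create_clean_machine_settings_structure_py (machine_settings : List (String × String)) : Prop :=
  (machine_settings.map Prod.fst).Nodup
instance (machine_settings : List (String × String)) : Decidable (Pre_create_clean_machine_settings_structure_py machine_settings) := by unfold Pre_create_clean_machine_settings_structure_py; infer_instance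
def pvWitness_create_clean_machine_settings_structure_py : (List (String × String)) :=
  [("wavelength", "1064nm"), ("spotSize", "0.2mm"), ("spotSizeUnit", "mm"), ("custom", "x")]
def Spec_create_clean_machine_settings_structure_py (machine_settings : List (String × String)) (out : List (String × String)) : Prop := out = create_clean_machine_settings_structure_py_alt machine_settings
instance (machine_settings : List (String × String)) (out : List (String × String)) : Decidable (Spec_create_clean_machine_settings_structure_py machine_settings out) := by unfold Spec_create_clean_machine_settings_structure_py; infer_instance

-- ===== CLAIM (what is proved, stated in full; the proofs are below) =====
def Claim_equal_create_clean_machine_settings_structure_py : Prop := ∀ (machine_settings : List (String × String)), Dom_create_clean_machine_settings_structure_py machine_settings → Pre_create_clean_machine_settings_structure_py machine_settings → Spec_create_clean_machine_settings_structure_py machine_settings (create_clean_machine_settings_structure_py machine_settings)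

-- ===== LEMMAS AND PROOFS =====

-- proof-only helpers
def pvTrip (s : String) : List String := [s, s ++ "Unit", s ++ "Range"]

def pvGroups : List String :=
  ["powerRange", "wavelength", "pulseDuration", "spotSize",
   "repetitionRate", "fluenceRange", "scanningSpeed"]

def pvOrder (d : PySem.Dict String String) : List String :=
  (pvGroups.filter (fun s => d.contains s)).flatMap pvTrip

-- the recognised fields of A's first pass, in priority order, with their values
def pvP (d : PySem.Dict String String) : List (String × String) :=
  ((pvOrder d).filter (fun k => d.contains k)).map (fun k => (k, d.getD k ""))

-- contains = false stated as non-membership in keys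
theorem pv_contains_false_iff (d : PySem.Dict String String) (k : String) :
    d.contains k = false ↔ k ∉ d.keys := by
  rw [← PySem.Dict.contains_iff_mem_keys]
  simp

-- A's guarded-insert loop over fresh distinct field names appends the present ones
theorem pv_innerfold (ns : List String) (d cs : PySem.Dict String String)
    (hnd : ns.Nodup) (hfresh : ∀ x ∈ ns, cs.contains x = false) :
    (ns.foldl (fun cs fn => if d.contains fn then cs.insert fn (d.getD fn "") else cs) cs).items
      = cs.items ++ (ns.filter (fun k => d.contains k)).map (fun k => (k, d.getD k "")) := by
  induction ns generalizing cs with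
  | nil => simp
  | cons n ns ih =>
    have hnotmem : n ∉ ns := (List.nodup_cons.mp hnd).1
    have hndtl : ns.Nodup := (List.nodup_cons.mp hnd).2
    by_cases hc : d.contains n = true
    · have hfn : cs.contains n = false := hfresh n (by simp)
      have hins : (cs.insert n (d.getD n "")).items = cs.items ++ [(n, d.getD n "")] :=
        PySem.Dict.items_insert_of_not_contains _ _ hfn
      have hfresh' : ∀ x ∈ ns, (cs.insert n (d.getD n "")).contains x = false := by
        intro x hx
        have hxn : x ≠ n := fun h => hnotmem (h ▸ hx)
        rw [PySem.Dict.contains_insert]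
        simp [hxn, hfresh x (List.mem_cons_of_mem _ hx)]
      simp only [List.foldl_cons, hc, if_true]
      rw [ih _ hndtl hfresh', hins]
      simp [hc]
    · have hc' : d.contains n = false := by simpa using hc
      simp only [List.foldl_cons, hc', Bool.false_eq_true, if_false]
      rw [ih _ hndtl (fun x hx => hfresh x (List.mem_cons_of_mem _ hx))]
      simp [hc']

-- A's outer loop over the setting groups
theorem pv_outerfold (gs : List String) (d cs : PySem.Dict String String)
    (hnd : (gs.flatMap pvTrip).Nodup) (hfresh : ∀ x ∈ gs.flatMap pvTrip, cs.contains x = false) :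
    (gs.foldl (fun cs setting =>
        if d.contains setting then
          (["Unit", "Range"] : List String).foldl (fun cs suffix =>
            if d.contains (setting ++ suffix) then cs.insert (setting ++ suffix) (d.getD (setting ++ suffix) "") else cs)
            (cs.insert setting (d.getD setting ""))
        else cs) cs).items
      = cs.items ++ (((gs.filter (fun s => d.contains s)).flatMap pvTrip).filter (fun k => d.contains k)).map
          (fun k => (k, d.getD k "")) := by
  induction gs generalizing cs with
  | nil => simp
  | cons s gs ih =>
    have hnd' : (pvTrip s ++ gs.flatMap pvTrip).Nodup := by simpa [pvTrip] using hnd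
    have h1 : (pvTrip s).Nodup := hnd'.of_append_left
    have h2 : (gs.flatMap pvTrip).Nodup := hnd'.of_append_right
    have hdisj : ∀ x ∈ gs.flatMap pvTrip, x ∉ pvTrip s := by
      intro x hx hxs
      exact (List.disjoint_of_nodup_append hnd') hxs hx
    have hfresh1 : ∀ x ∈ pvTrip s, cs.contains x = false := fun x hx =>
      hfresh x (by rw [List.flatMap_cons]; exact List.mem_append_left _ hx)
    have hfresh2 : ∀ x ∈ gs.flatMap pvTrip, cs.contains x = false := fun x hx =>
      hfresh x (by rw [List.flatMap_cons]; exact List.mem_append_right _ hx)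
    by_cases hc : d.contains s = true
    · have hacc : (["Unit", "Range"] : List String).foldl (fun cs suffix =>
            if d.contains (s ++ suffix) = true then cs.insert (s ++ suffix) (d.getD (s ++ suffix) "") else cs)
            (cs.insert s (d.getD s ""))
          = (pvTrip s).foldl (fun cs fn => if d.contains fn = true then cs.insert fn (d.getD fn "") else cs) cs := by
        simp [pvTrip, List.foldl, hc]
      rw [List.foldl_cons, if_pos hc, hacc]
      have hitems := pv_innerfold (pvTrip s) d cs h1 hfresh1
      set cs₁ := (pvTrip s).foldl (fun cs fn => if d.contains fn = true then cs.insert fn (d.getD fn "") else cs) cs with hcs₁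
      have hkeys : cs₁.keys = cs.keys ++ (pvTrip s).filter (fun k => d.contains k) := by
        simp only [PySem.Dict.keys, hitems, List.map_append, List.map_map]
        simp [Function.comp_def]
      have hfresh' : ∀ x ∈ gs.flatMap pvTrip, cs₁.contains x = false := by
        intro x hx
        rw [pv_contains_false_iff, hkeys]
        intro hmem
        rcases List.mem_append.mp hmem with h | h
        · exact (pv_contains_false_iff cs x).mp (hfresh2 x hx) h
        · exact hdisj x hx (List.mem_of_mem_filter h)
      rw [ih cs₁ h2 hfresh', hitems]
      simp [hc, List.filter_append]
    · have hc' : d.contains s = false := by simpa using hc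
      rw [List.foldl_cons, if_neg (by simp [hc']), ih cs h2 hfresh2]
      simp [hc']

-- A's leftover pass appends the not-yet-present items (keys assumed distinct)
theorem pv_phase2 (l : List (String × String)) (cs : PySem.Dict String String)
    (hnd : (l.map Prod.fst).Nodup) :
    (l.foldl (fun cs kv => if cs.contains kv.1 then cs else cs.insert kv.1 kv.2) cs).items
      = cs.items ++ l.filter (fun kv => !cs.contains kv.1) := by
  induction l generalizing cs with
  | nil => simp
  | cons x l ih =>
    have hnotmem : x.1 ∉ l.map Prod.fst := (List.nodup_cons.mp hnd).1
    have hndtl : (l.map Prod.fst).Nodup := (List.nodup_cons.mp hnd).2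
    have hcongr : ∀ cs' : PySem.Dict String String,
        (∀ kv ∈ l, cs'.contains kv.1 = cs.contains kv.1) →
        l.filter (fun kv => !cs'.contains kv.1) = l.filter (fun kv => !cs.contains kv.1) := by
      intro cs' h
      exact List.filter_congr (fun kv hkv => by rw [h kv hkv])
    by_cases hc : cs.contains x.1 = true
    · simp only [List.foldl_cons, hc, if_true]
      rw [ih cs hndtl]
      simp [hc]
    · simp only [List.foldl_cons, hc]
      rw [if_neg (by simp)]
      rw [ih _ hndtl]
      rw [PySem.Dict.items_insert_of_not_contains _ _ (by simp [hc])]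
      rw [hcongr _ (fun kv hkv => by
        rw [PySem.Dict.contains_insert]
        have : kv.1 ≠ x.1 := fun h => hnotmem (h ▸ List.mem_map_of_mem hkv)
        simp [this])]
      simp [hc]

-- B's rank table over the priority names
theorem pv_rank0_items (order : List String) (hnd : order.Nodup) :
    ((PySem.List.enumerate order 0).foldl (fun r p => r.insert p.2 p.1)
        (PySem.Dict.empty : PySem.Dict String Int)).items
      = (PySem.List.enumerate order 0).map (fun p => (p.2, p.1)) := by
  have h := PySem.Dict.items_foldl_insert_fresh (l := PySem.List.enumerate order 0)
    (k := fun p => p.2) (v := fun p => p.1) (d := (PySem.Dict.empty : PySem.Dict String Int))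
    (by intro a _; simp [PySem.Dict.contains_empty])
    (by rw [PySem.List.map_snd_enumerate]; exact hnd)
  simpa using h

-- B's leftover-rank loop appends fresh keys with consecutive sizes
theorem pv_rank1_items (l : List (String × String)) (r : PySem.Dict String Int)
    (hnd : (l.map Prod.fst).Nodup) :
    (l.foldl (fun r kv => if r.contains kv.1 then r else r.insert kv.1 (r.size : Int)) r).items
      = r.items ++ (PySem.List.enumerate ((l.filter (fun kv => !r.contains kv.1)).map Prod.fst) (r.size : Int)).map
          (fun p => (p.2, p.1)) := by
  induction l generalizing r with
  | nil => simp
  | cons x l ih =>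
    have hnotmem : x.1 ∉ l.map Prod.fst := (List.nodup_cons.mp hnd).1
    have hndtl : (l.map Prod.fst).Nodup := (List.nodup_cons.mp hnd).2
    by_cases hc : r.contains x.1 = true
    · simp only [List.foldl_cons, hc, if_true]
      rw [ih r hndtl]
      simp [hc]
    · simp only [List.foldl_cons, hc]
      rw [if_neg (by simp)]
      rw [ih _ hndtl]
      have hins : (r.insert x.1 (r.size : Int)).items = r.items ++ [(x.1, (r.size : Int))] :=
        PySem.Dict.items_insert_of_not_contains _ _ (by simp [hc])
      have hsize : ((r.insert x.1 (r.size : Int)).size : Int) = (r.size : Int) + 1 := by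
        rw [PySem.Dict.size_insert]
        simp [hc]
      have hfilt : l.filter (fun kv => !(r.insert x.1 (r.size : Int)).contains kv.1)
          = l.filter (fun kv => !r.contains kv.1) := by
        refine List.filter_congr (fun kv hkv => ?_)
        rw [PySem.Dict.contains_insert]
        have : kv.1 ≠ x.1 := fun h => hnotmem (h ▸ List.mem_map_of_mem hkv)
        simp [this]
      rw [hins, hfilt, hsize]
      simp [hc, PySem.List.enumerate_cons]

-- a nodup list is strictly idxOf-increasing
theorem pv_pairwise_idxOf (l : List String) (hnd : l.Nodup) :
    l.Pairwise (fun a b => l.idxOf a < l.idxOf b) := by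
  rw [List.pairwise_iff_getElem]
  intro i j hi hj hij
  rw [hnd.idxOf_getElem i hi, hnd.idxOf_getElem j hj]
  exact hij





-- named pieces of the two ports (proof-only; each is definitionally the port's sub-term)
def pvClean (d : PySem.Dict String String) : PySem.Dict String String :=
  pvGroups.foldl (fun cs setting =>
    if d.contains setting then
      (["Unit", "Range"] : List String).foldl (fun cs suffix =>
        if d.contains (setting ++ suffix) then cs.insert (setting ++ suffix) (d.getD (setting ++ suffix) "") else cs)
        (cs.insert setting (d.getD setting ""))
    else cs) PySem.Dict.empty

def pvOrderFold (d : PySem.Dict String String) : List String :=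
  pvGroups.foldl (fun o setting =>
    if d.contains setting then o ++ [setting, setting ++ "Unit", setting ++ "Range"] else o) []

def pvRank0 (d : PySem.Dict String String) : PySem.Dict String Int :=
  (PySem.List.enumerate (pvOrderFold d) 0).foldl (fun r p => r.insert p.2 p.1) PySem.Dict.empty

def pvRank (d : PySem.Dict String String) : PySem.Dict String Int :=
  d.items.foldl (fun r kv => if r.contains kv.1 then r else r.insert kv.1 (r.size : Int)) (pvRank0 d)

theorem pv_A_unfold (ms : List (String × String)) :
    create_clean_machine_settings_structure_py ms
      = (ms.foldl (fun cs kv => if cs.contains kv.1 then cs else cs.insert kv.1 kv.2)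
          (pvClean (PySem.Dict.mk ms))).items := rfl

theorem pv_B_unfold (ms : List (String × String)) :
    create_clean_machine_settings_structure_py_alt ms
      = PySem.List.sorted ms (fun kv => (pvRank (PySem.Dict.mk ms)).getD kv.1 0) false := rfl

-- the normal form both ports compute: recognised fields in priority order, then the leftovers
theorem pv_main (ms : List (String × String)) (hpre : (ms.map Prod.fst).Nodup) :
    create_clean_machine_settings_structure_py ms = create_clean_machine_settings_structure_py_alt ms := by
  have hGnd : (pvGroups.flatMap pvTrip).Nodup := by decide
  set d : PySem.Dict String String := PySem.Dict.mk ms with hd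
  have hitems : d.items = ms := rfl
  have hkeysd : d.keys = ms.map Prod.fst := rfl
  have hknd : d.keys.Nodup := by rw [hkeysd]; exact hpre
  have hcont : ∀ kv ∈ ms, d.contains kv.1 = true := by
    intro kv hkv
    exact (PySem.Dict.contains_iff_mem_keys d kv.1).mpr (by rw [hkeysd]; exact List.mem_map_of_mem hkv)
  have hgetD : ∀ kv ∈ ms, d.getD kv.1 "" = kv.2 := by
    intro kv hkv
    exact PySem.Dict.getD_of_mem_items d (k := kv.1) (v := kv.2) hkv hknd ""
  have hordnd : (pvOrder d).Nodup := (List.filter_sublist.flatMap pvTrip).nodup hGnd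
  set rest : List (String × String) := ms.filter (fun kv => !decide (kv.1 ∈ pvOrder d)) with hrest
  set restK : List String := rest.map Prod.fst with hrestK
  set N : Int := ((pvOrder d).length : Int) with hN
  -- ===== A reduces to pvP d ++ rest =====
  have hCleanItems : (pvClean d).items = pvP d := by
    unfold pvClean
    rw [pv_outerfold pvGroups d PySem.Dict.empty hGnd (by intro x _; simp)]
    rfl
  have hCleanKeys : (pvClean d).keys = (pvOrder d).filter (fun k => d.contains k) := by
    simp only [PySem.Dict.keys, hCleanItems, pvP, List.map_map, Function.comp_def]
    simp
  have hA : create_clean_machine_settings_structure_py ms = pvP d ++ rest := by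
    rw [pv_A_unfold, ← hd, pv_phase2 ms (pvClean d) hpre, hCleanItems, hrest]
    congr 1
    refine List.filter_congr (fun kv hkv => ?_)
    rw [PySem.Dict.contains_eq_decide_mem_keys, hCleanKeys]
    congr 1
    rw [decide_eq_decide]
    exact ⟨fun h => List.mem_of_mem_filter h, fun h => List.mem_filter.mpr ⟨h, hcont kv hkv⟩⟩
  -- ===== B's rank table =====
  have hOF : pvOrderFold d = pvOrder d := by
    unfold pvOrderFold
    rw [PySem.List.foldl_if_eq_foldl_filter (fun s => d.contains s)
          (fun o s => o ++ [s, s ++ "Unit", s ++ "Range"]),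
        PySem.List.foldl_append_eq_flatMap (fun s => [s, s ++ "Unit", s ++ "Range"])]
    rfl
  set r0 : PySem.Dict String Int := pvRank0 d with hr0
  have hr0items : r0.items = (PySem.List.enumerate (pvOrder d) 0).map (fun p => (p.2, p.1)) := by
    rw [hr0]; unfold pvRank0; rw [hOF]; exact pv_rank0_items _ hordnd
  have hr0keys : r0.keys = pvOrder d := by
    simp only [PySem.Dict.keys, hr0items, List.map_map, Function.comp_def]
    exact PySem.List.map_snd_enumerate _ _
  have hr0size : (r0.size : Int) = N := by
    simp [PySem.Dict.size, hr0items, PySem.List.length_enumerate, hN]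
  have hfilt0 : ms.filter (fun kv => !r0.contains kv.1) = rest := by
    rw [hrest]
    refine List.filter_congr (fun kv _ => ?_)
    rw [PySem.Dict.contains_eq_decide_mem_keys, hr0keys]
  set r1 : PySem.Dict String Int := pvRank d with hr1
  have hr1items : r1.items = r0.items ++ (PySem.List.enumerate restK N).map (fun p => (p.2, p.1)) := by
    rw [hr1]; unfold pvRank
    rw [hitems, ← hr0, pv_rank1_items ms r0 hpre, hfilt0, hr0size, hrestK]
  have hrestKnd : restK.Nodup := (List.filter_sublist.map Prod.fst).nodup hpre
  have hrestnotord : ∀ x ∈ restK, x ∉ pvOrder d := by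
    intro x hx
    rcases List.mem_map.mp hx with ⟨kv, hkv, rfl⟩
    have h2 := (List.mem_filter.mp hkv).2
    simpa using h2
  have hr1keys : r1.keys = pvOrder d ++ restK := by
    simp only [PySem.Dict.keys, hr1items, List.map_append, List.map_map, Function.comp_def]
    rw [PySem.List.map_snd_enumerate, hr0items, List.map_map]
    simp [Function.comp_def, PySem.List.map_snd_enumerate]
  have hr1nd : r1.keys.Nodup := by
    rw [hr1keys]
    exact hordnd.append hrestKnd (fun a ha hb => hrestnotord a hb ha)
  -- rank of a recognised field is its index in the priority order
  have hR1 : ∀ k ∈ pvOrder d, r1.getD k 0 = ((pvOrder d).idxOf k : Int) := by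
    intro k hk
    have hi : (pvOrder d).idxOf k < (pvOrder d).length := List.idxOf_lt_length_iff.mpr hk
    have hmem : (k, (((pvOrder d).idxOf k : Int))) ∈ r1.items := by
      rw [hr1items, hr0items]
      refine List.mem_append_left _ (List.mem_map.mpr ⟨((((pvOrder d).idxOf k : Int)), k), ?_, rfl⟩)
      refine (PySem.List.mem_enumerate_iff _ _ _).mpr ⟨(pvOrder d).idxOf k, hi, ?_⟩
      simp [List.getElem_idxOf hi]
    exact PySem.Dict.getD_of_mem_items r1 hmem hr1nd 0
  -- rank of the j-th leftover key is N + j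
  have hR2 : ∀ (j : Nat), (hj : j < restK.length) → r1.getD restK[j] 0 = N + j := by
    intro j hj
    have hmem : (restK[j], N + (j : Int)) ∈ r1.items := by
      rw [hr1items]
      refine List.mem_append_right _ (List.mem_map.mpr ⟨(N + (j : Int), restK[j]), ?_, rfl⟩)
      exact (PySem.List.mem_enumerate_iff _ _ _).mpr ⟨j, hj, rfl⟩
    exact PySem.Dict.getD_of_mem_items r1 hmem hr1nd 0
  -- membership facts about pvP d
  have hPmem : ∀ kv ∈ pvP d, kv ∈ ms ∧ kv.1 ∈ pvOrder d := by
    intro kv hkv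
    rcases List.mem_map.mp hkv with ⟨k, hk, rfl⟩
    have hkord : k ∈ pvOrder d := List.mem_of_mem_filter hk
    have hkc : d.contains k = true := (List.mem_filter.mp hk).2
    have hks : k ∈ d.keys := (PySem.Dict.contains_iff_mem_keys d k).mp hkc
    rcases List.mem_map.mp (by rw [hkeysd] at hks; exact hks) with ⟨kv', hkv', hfst⟩
    have hv : d.getD k "" = kv'.2 := by rw [← hfst]; exact hgetD kv' hkv'
    refine ⟨?_, hkord⟩
    rw [hv, ← hfst]
    exact hkv'
  -- the two halves form a permutation of ms
  have hPkeys : (pvP d).map Prod.fst = (pvOrder d).filter (fun k => d.contains k) := by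
    simp [pvP, List.map_map, Function.comp_def]
  have hysnd : (pvP d ++ rest).Nodup := by
    have hk : ((pvP d ++ rest).map Prod.fst).Nodup := by
      rw [List.map_append, hPkeys, ← hrestK]
      exact (hordnd.filter _).append hrestKnd
        (fun a ha hb => hrestnotord a hb (List.mem_of_mem_filter ha))
    exact hk.of_map
  have hmsnd : ms.Nodup := hpre.of_map
  have hperm : (pvP d ++ rest).Perm ms := by
    rw [List.perm_ext_iff_of_nodup hysnd hmsnd]
    intro kv
    constructor
    · intro h
      rcases List.mem_append.mp h with h | h
      · exact (hPmem kv h).1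
      · exact List.mem_of_mem_filter h
    · intro h
      by_cases hko : kv.1 ∈ pvOrder d
      · refine List.mem_append_left _ (List.mem_map.mpr ⟨kv.1, ?_, ?_⟩)
        · exact List.mem_filter.mpr ⟨hko, hcont kv h⟩
        · rw [hgetD kv h]
      · exact List.mem_append_right _ (List.mem_filter.mpr ⟨h, by simpa using hko⟩)
  -- strictly increasing ranks along pvP d ++ rest
  have hpw : List.Pairwise (fun a b : String × String => r1.getD a.1 0 < r1.getD b.1 0) (pvP d ++ rest) := by
    rw [List.pairwise_append]
    refine ⟨?_, ?_, ?_⟩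
    · unfold pvP
      rw [List.pairwise_map]
      have base : ((pvOrder d).filter (fun k => d.contains k)).Pairwise
          (fun a b => (pvOrder d).idxOf a < (pvOrder d).idxOf b) :=
        (pv_pairwise_idxOf (pvOrder d) hordnd).sublist List.filter_sublist
      refine base.imp_of_mem ?_
      intro a b ha hb hlt
      rw [hR1 a (List.mem_of_mem_filter ha), hR1 b (List.mem_of_mem_filter hb)]
      exact_mod_cast hlt
    · rw [List.pairwise_iff_getElem]
      intro i j hi hj hij
      have hi' : i < restK.length := by rw [hrestK]; simpa using hi
      have hj' : j < restK.length := by rw [hrestK]; simpa using hj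
      have e1 := hR2 i hi'
      have e2 := hR2 j hj'
      have gi : restK[i] = rest[i].1 := by simp [hrestK]
      have gj : restK[j] = rest[j].1 := by simp [hrestK]
      rw [gi] at e1
      rw [gj] at e2
      rw [e1, e2]
      omega
    · intro a ha b hb
      have hao : a.1 ∈ pvOrder d := (hPmem a ha).2
      have hi : (pvOrder d).idxOf a.1 < (pvOrder d).length := List.idxOf_lt_length_iff.mpr hao
      rcases List.mem_iff_getElem.mp hb with ⟨j, hj, rfl⟩
      have hj' : j < restK.length := by rw [hrestK]; simpa using hj
      have e2 := hR2 j hj'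
      have gj : restK[j] = rest[j].1 := by simp [hrestK]
      rw [gj] at e2
      rw [hR1 a.1 hao, e2, hN]
      omega
  calc create_clean_machine_settings_structure_py ms = pvP d ++ rest := hA
    _ = create_clean_machine_settings_structure_py_alt ms := by
        rw [pv_B_unfold, ← hd, ← hr1]
        exact (PySem.List.sorted_eq_of_perm_of_pairwise_lt ms (pvP d ++ rest)
          (fun kv => r1.getD kv.1 0) hperm hpw).symm

-- ===== VERDICT (by name: the statement is the Claim_ definition above) =====
theorem create_clean_machine_settings_structure_py_spec : Claim_equal_create_clean_machine_settings_structure_py := by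
  intro ms _ hpre
  unfold Spec_create_clean_machine_settings_structure_py
  exact pv_main ms hpre
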